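-- pv_equiv track=rewrite | github.com/vosslab/biology-problems | biochemistry-problems/PUBCHEM/aminoacidlib.py | make_poly_peptide
-- ===== SOURCE A (Python) =====
-- def make_poly_peptide(length=5):
-- 	amino_terminal_end = '[NH3+][C@@H]'
-- 	carboxyl_terminal_end = '(C(=O)[O-])'
-- 	peptide_bond = '(C(=O)N[C@@H]'
-- 	# make chain
-- 	peptide_chain = ''
-- 	peptide_chain += amino_terminal_end
-- 	for i in range(length):
-- 		peptide_chain += f'R{i+1}'
-- 		if i+1 < length:
-- 			peptide_chain += peptide_bond
-- 	peptide_chain += carboxyl_terminal_end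
-- 	for i in range(length-1):
-- 		peptide_chain += ')'
-- 	return peptide_chain
-- ===== SOURCE B (Python) =====
-- def make_poly_peptide(length=5):
-- 	amino_terminal_end = '[NH3+][C@@H]'
-- 	carboxyl_terminal_end = '(C(=O)[O-])'
-- 	peptide_bond = '(C(=O)N[C@@H]'
-- 	if length <= 0:
-- 		return amino_terminal_end + carboxyl_terminal_end
-- 	# build the list of fragments BACK-TO-FRONT: all closing parens first,
-- 	# then the C-terminal residue, then the remaining residues in a single
-- 	# descending pass, then the amino cap; reverse once and join
-- 	rev = [')'] * (length - 1)
-- 	rev.append(f'R{length}' + carboxyl_terminal_end)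
-- 	for i in range(length - 1, 0, -1):
-- 		rev.append(f'R{i}' + peptide_bond)
-- 	rev.append(amino_terminal_end)
-- 	rev.reverse()
-- 	return ''.join(rev)
-- ===== Notes on version B (the rewrite author's own statement) =====
-- stated objective: alternative
-- what changed: B builds the list of output fragments back-to-front (closing parens, C-terminal residue, then the remaining residues in one descending pass, then the amino cap), reverses it once and joins, instead of A's forward conditional residue pass and separate trailing closing-paren pass with string accumulation.
import Mathlib
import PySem

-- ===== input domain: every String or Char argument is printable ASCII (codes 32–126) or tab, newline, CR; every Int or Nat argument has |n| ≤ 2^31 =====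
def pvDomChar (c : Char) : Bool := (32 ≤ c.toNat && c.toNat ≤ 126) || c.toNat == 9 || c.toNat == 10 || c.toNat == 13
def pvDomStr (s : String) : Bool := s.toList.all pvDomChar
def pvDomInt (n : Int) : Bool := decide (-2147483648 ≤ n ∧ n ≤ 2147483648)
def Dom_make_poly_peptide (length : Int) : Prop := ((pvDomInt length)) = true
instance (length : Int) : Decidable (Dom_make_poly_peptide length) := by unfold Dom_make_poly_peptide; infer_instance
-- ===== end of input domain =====

-- B builds the list of output fragments back-to-front (parens first, residues in a
-- descending pass, amino cap last), reverses it once and joins, instead of A's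
-- forward residue pass plus a separate closing-paren pass; objective: alternative.

-- ===== PORT A =====
def make_poly_peptide (length : Int) : String :=
  let amino_terminal_end := "[NH3+][C@@H]"
  let carboxyl_terminal_end := "(C(=O)[O-])"
  let peptide_bond := "(C(=O)N[C@@H]"
  let peptide_chain := "" ++ amino_terminal_end
  let peptide_chain := (PySem.List.pyRange 0 length 1).foldl
    (fun chain i =>
      let chain := chain ++ "R" ++ PySem.Int.toStr (i + 1)
      if i + 1 < length then chain ++ peptide_bond else chain)
    peptide_chain
  let peptide_chain := peptide_chain ++ carboxyl_terminal_end
  (PySem.List.pyRange 0 (length - 1) 1).foldl (fun chain _ => chain ++ ")") peptide_chain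

-- ===== PORT B =====
def make_poly_peptide_alt (length : Int) : String :=
  let amino_terminal_end := "[NH3+][C@@H]"
  let carboxyl_terminal_end := "(C(=O)[O-])"
  let peptide_bond := "(C(=O)N[C@@H]"
  if length ≤ 0 then amino_terminal_end ++ carboxyl_terminal_end
  else
    let rev := PySem.List.pyRepeat [")"] (length - 1)
    let rev := rev ++ ["R" ++ PySem.Int.toStr length ++ carboxyl_terminal_end]
    let rev := (PySem.List.pyRange (length - 1) 0 (-1)).foldl
      (fun rev i => rev ++ ["R" ++ PySem.Int.toStr i ++ peptide_bond]) rev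
    let rev := rev ++ [amino_terminal_end]
    PySem.Str.join "" rev.reverse

-- ===== PRECONDITION & SPEC =====
def Spec_make_poly_peptide (length : Int) (out : String) : Prop := out = make_poly_peptide_alt length
instance (length : Int) (out : String) : Decidable (Spec_make_poly_peptide length out) := by unfold Spec_make_poly_peptide; infer_instance

-- ===== CLAIM (what is proved, stated in full; the proofs are below) =====
def Claim_equal_make_poly_peptide : Prop := ∀ (length : Int), Dom_make_poly_peptide length → Spec_make_poly_peptide length (make_poly_peptide length)

-- ===== LEMMAS AND PROOFS =====

-- "R1(bond)R2(bond)…Rm(bond)" : the residues 1..m each followed by a peptide bond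
def pvBody : Nat → String
  | 0 => ""
  | m + 1 => pvBody m ++ "R" ++ PySem.Int.toStr ((m : Int) + 1) ++ "(C(=O)N[C@@H]"

-- m closing parentheses
def pvParens : Nat → String
  | 0 => ""
  | m + 1 => pvParens m ++ ")"

-- "Ri(bond)R(i+1)(bond)…R(i+m-1)(bond)" : m residues starting at i, each with a bond
def pvPre : Int → Nat → String
  | _, 0 => ""
  | i, m + 1 => "R" ++ PySem.Int.toStr i ++ "(C(=O)N[C@@H]" ++ pvPre (i + 1) m

-- A's residue loop: the condition holds on every i < m when (m : Int) < n
theorem pvAscFold (n : Int) :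
    ∀ (m : Nat), (m : Int) < n → ∀ (init : String),
    (PySem.List.pyRange 0 (m : Int) 1).foldl
      (fun chain i =>
        let chain := chain ++ "R" ++ PySem.Int.toStr (i + 1)
        if i + 1 < n then chain ++ "(C(=O)N[C@@H]" else chain)
      init = init ++ pvBody m := by
  intro m
  induction m with
  | zero =>
    intro _ init
    simp [PySem.List.pyRange_one_eq_nil, pvBody]
  | succ m ih =>
    intro h init
    have hsplit : PySem.List.pyRange 0 ((m + 1 : Nat) : Int) 1
        = PySem.List.pyRange 0 (m : Int) 1 ++ [(m : Int)] := by
      have : ((m + 1 : Nat) : Int) = (m : Int) + 1 := by push_cast; ring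
      rw [this, PySem.List.pyRange_one_succ_right (by positivity)]
    rw [hsplit, List.foldl_append, ih (by push_cast at h ⊢; omega)]
    have hcond : (m : Int) + 1 < n := by push_cast at h; omega
    simp only [List.foldl_cons, List.foldl_nil, if_pos hcond, pvBody,
      String.append_assoc]

-- A's closing-paren loop
theorem pvParenFold : ∀ (m : Nat) (init : String),
    (PySem.List.pyRange 0 (m : Int) 1).foldl (fun chain _ => chain ++ ")") init
      = init ++ pvParens m := by
  intro m
  induction m with
  | zero => intro init; simp [PySem.List.pyRange_one_eq_nil, pvParens]
  | succ m ih =>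
    intro init
    have hsplit : PySem.List.pyRange 0 ((m + 1 : Nat) : Int) 1
        = PySem.List.pyRange 0 (m : Int) 1 ++ [(m : Int)] := by
      have : ((m + 1 : Nat) : Int) = (m : Int) + 1 := by push_cast; ring
      rw [this, PySem.List.pyRange_one_succ_right (by positivity)]
    rw [hsplit, List.foldl_append, ih]
    simp [pvParens, String.append_assoc]

-- ")" commutes with a block of parens
theorem pvParens_comm (m : Nat) : ")" ++ pvParens m = pvParens m ++ ")" := by
  induction m with
  | zero => simp [pvParens]
  | succ m ih => simp only [pvParens, ← String.append_assoc, ih]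

-- ''.join with the empty separator, one piece at a time
theorem pvJoinNil : PySem.Str.join "" [] = "" := by
  simp [PySem.Str.join, PySem.Chars.join_nil]

theorem pvJoinCons (a : String) (l : List String) :
    PySem.Str.join "" (a :: l) = a ++ PySem.Str.join "" l := by
  cases l with
  | nil => simp [PySem.Str.join, PySem.Chars.join_singleton, PySem.Chars.join_nil]
  | cons b l =>
    simp [PySem.Str.join, PySem.Chars.join_cons_cons]

theorem pvJoinAppend (l1 l2 : List String) :
    PySem.Str.join "" (l1 ++ l2) = PySem.Str.join "" l1 ++ PySem.Str.join "" l2 := by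
  induction l1 with
  | nil => simp [pvJoinNil]
  | cons a l1 ih => simp only [List.cons_append, pvJoinCons, ih, String.append_assoc]

-- appending singletons in a fold is mapping
theorem pvFoldlSnoc (f : Int → String) :
    ∀ (xs : List Int) (l0 : List String),
    xs.foldl (fun acc i => acc ++ [f i]) l0 = l0 ++ xs.map f := by
  intro xs
  induction xs with
  | nil => intro l0; simp
  | cons x xs ih => intro l0; simp [ih]

-- joining the ascending residue pieces gives A's body
theorem pvJoinAsc : ∀ (m : Nat),
    PySem.Str.join "" ((PySem.List.pyRange 1 ((m : Int) + 1) 1).map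
      (fun i => "R" ++ PySem.Int.toStr i ++ "(C(=O)N[C@@H]")) = pvBody m := by
  intro m
  induction m with
  | zero => simp [PySem.List.pyRange_one_eq_nil, pvBody, pvJoinNil]
  | succ m ih =>
    have hsplit : PySem.List.pyRange 1 (((m + 1 : Nat) : Int) + 1) 1
        = PySem.List.pyRange 1 ((m : Int) + 1) 1 ++ [(m : Int) + 1] := by
      have : (((m + 1 : Nat) : Int)) + 1 = ((m : Int) + 1) + 1 := by push_cast; ring
      rw [this, PySem.List.pyRange_one_succ_right (by omega)]
    rw [hsplit, List.map_append, pvJoinAppend, ih]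
    simp only [List.map_cons, List.map_nil, pvJoinCons, pvJoinNil, pvBody,
      String.append_assoc, String.append_empty]

-- joining m one-paren pieces gives the paren block
theorem pvJoinParens : ∀ (m : Nat),
    PySem.Str.join "" (List.replicate m ")") = pvParens m := by
  intro m
  induction m with
  | zero => simp [pvParens, pvJoinNil]
  | succ m ih => rw [List.replicate_succ, pvJoinCons, ih, pvParens_comm]; rfl

-- ===== VERDICT (by name: the statement is the Claim_ definition above) =====
theorem make_poly_peptide_spec : Claim_equal_make_poly_peptide := by
  intro length _
  unfold Spec_make_poly_peptide make_poly_peptide make_poly_peptide_alt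
  dsimp only
  by_cases h : length ≤ 0
  · rw [if_pos h]
    rw [PySem.List.pyRange_one_eq_nil h, PySem.List.pyRange_one_eq_nil (by omega)]
    simp
  · rw [if_neg h]
    obtain ⟨m, hm⟩ : ∃ m : Nat, length = ((m : Int) + 1) := by
      refine ⟨(length - 1).toNat, ?_⟩; omega
    subst hm
    -- A side
    have hsplit : PySem.List.pyRange 0 ((m : Int) + 1) 1
        = PySem.List.pyRange 0 (m : Int) 1 ++ [(m : Int)] :=
      PySem.List.pyRange_one_succ_right (by positivity)
    rw [hsplit, List.foldl_append,
      pvAscFold ((m : Int) + 1) m (by omega),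
      show ((m : Int) + 1 - 1) = (m : Int) by ring,
      pvParenFold]
    simp only [List.foldl_cons, List.foldl_nil, if_neg (lt_irrefl ((m : Int) + 1))]
    -- B side
    rw [pvFoldlSnoc, PySem.List.pyRange_neg_one_eq_reverse, List.map_reverse,
      PySem.List.pyRepeat_singleton]
    simp only [List.reverse_append, List.reverse_cons, List.reverse_nil,
      List.reverse_reverse, List.nil_append, List.cons_append, List.append_assoc,
      List.reverse_replicate, Int.toNat_natCast, zero_add]
    rw [pvJoinCons, pvJoinAppend, pvJoinAsc, pvJoinCons, pvJoinParens]
    simp [String.append_assoc]
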